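-- pv_equiv track=rewrite | github.com/swaggyp52/redbyte-hil-suite | src/file_ingestion.py | _find_time_column
-- ===== SOURCE A (Python) =====
-- from typing import Optional
--
-- _TIME_COL_HINTS: frozenset[str] = frozenset({
--     "time", "time(s)", "time(ms)", "time(us)", "time(ns)",
--     "t", "ts", "timestamp", "seconds", "time_s", "time_ms",
-- })
--
-- def _find_time_column(columns: list[str]) -> Optional[str]:
--     """Return the column name most likely to be the time axis."""
--     for col in columns:
--         if col.strip().lower() in _TIME_COL_HINTS:
--             return col
--     # Fuzzy: starts with "time" or "t("
--     for col in columns: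
--         lo = col.strip().lower()
--         if lo.startswith("time") or lo == "t":
--             return col
--     return None
-- ===== SOURCE B (Python) =====
-- from typing import Optional
--
-- _TIME_COL_HINTS: frozenset[str] = frozenset({
--     "time", "time(s)", "time(ms)", "time(us)", "time(ns)",
--     "t", "ts", "timestamp", "seconds", "time_s", "time_ms",
-- })
--
-- def _find_time_column(columns: list[str]) -> Optional[str]:
--     """Return the column name most likely to be the time axis."""
--     fallback = None
--     for col in columns:
--         lo = col.strip().lower()
--         if lo in _TIME_COL_HINTS:
--             return col
--         if fallback is None and (lo.startswith("time") or lo == "t"):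
--             fallback = col
--     return fallback
-- ===== Notes on version B (the rewrite author's own statement) =====
-- stated objective: simpler
-- what changed: Single pass keeping the first fuzzy candidate in a fallback variable instead of A's two full scans (exact-match scan, then fuzzy scan), so each column is stripped/lowered once.
import Mathlib
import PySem

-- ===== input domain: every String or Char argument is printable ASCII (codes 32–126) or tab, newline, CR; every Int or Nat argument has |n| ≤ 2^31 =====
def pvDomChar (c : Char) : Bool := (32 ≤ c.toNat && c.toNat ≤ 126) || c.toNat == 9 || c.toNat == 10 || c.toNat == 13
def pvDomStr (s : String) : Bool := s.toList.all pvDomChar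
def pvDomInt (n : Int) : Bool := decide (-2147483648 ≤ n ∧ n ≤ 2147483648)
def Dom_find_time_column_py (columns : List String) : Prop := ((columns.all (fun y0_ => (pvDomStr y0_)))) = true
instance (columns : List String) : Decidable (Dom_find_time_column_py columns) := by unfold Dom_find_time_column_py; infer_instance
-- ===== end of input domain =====

-- B replaces A's two full scans (exact then fuzzy) by one pass with a fallback variable; objective: simpler.


-- ===== PORT A =====
def timeColHints : List String :=
  ["time", "time(s)", "time(ms)", "time(us)", "time(ns)",
   "t", "ts", "timestamp", "seconds", "time_s", "time_ms"]

-- first loop of A: exact hint match on col.strip().lower()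
def findExact : List String → Option String
  | [] => none
  | col :: rest =>
      if timeColHints.contains (PySem.Str.lower (PySem.Str.strip col)) then some col
      else findExact rest

-- second loop of A: fuzzy match (startswith "time" or == "t")
def findFuzzy : List String → Option String
  | [] => none
  | col :: rest =>
      let lo := PySem.Str.lower (PySem.Str.strip col)
      if PySem.Str.startswith lo "time" || lo == "t" then some col
      else findFuzzy rest

def find_time_column_py (columns : List String) : Option String :=
  match findExact columns with
  | some c => some c
  | none => findFuzzy columns

-- ===== PORT B =====
-- single pass carrying the first fuzzy candidate as a fallback
def altGo : List String → Option String → Option String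
  | [], fallback => fallback
  | col :: rest, fallback =>
      let lo := PySem.Str.lower (PySem.Str.strip col)
      if timeColHints.contains lo then some col
      else if fallback.isNone && (PySem.Str.startswith lo "time" || lo == "t") then
        altGo rest (some col)
      else altGo rest fallback

def find_time_column_py_alt (columns : List String) : Option String :=
  altGo columns none

-- ===== PRECONDITION & SPEC =====
def Spec_find_time_column_py (columns : List String) (out : Option String) : Prop := out = find_time_column_py_alt columns
instance (columns : List String) (out : Option String) : Decidable (Spec_find_time_column_py columns out) := by unfold Spec_find_time_column_py; infer_instance

-- ===== CLAIM (what is proved, stated in full; the proofs are below) =====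
def Claim_equal_find_time_column_py : Prop := ∀ (columns : List String), Dom_find_time_column_py columns → Spec_find_time_column_py columns (find_time_column_py columns)

-- ===== LEMMAS AND PROOFS =====

-- once the fallback is set, B only still looks for an exact match
theorem altGo_some (cols : List String) (x : String) :
    altGo cols (some x) = match findExact cols with
      | some c => some c
      | none => some x := by
  induction cols with
  | nil => rfl
  | cons col rest ih =>
      simp only [altGo, findExact, Option.isNone_some, Bool.false_and, Bool.false_eq_true,
        if_false]
      split_ifs with h
      · rfl
      · exact ih

theorem altGo_none (cols : List String) :
    altGo cols none = match findExact cols with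
      | some c => some c
      | none => findFuzzy cols := by
  induction cols with
  | nil => rfl
  | cons col rest ih =>
      simp only [altGo, findExact, findFuzzy, Option.isNone_none, Bool.true_and]
      split_ifs <;> first | rfl | exact ih | rw [altGo_some]

-- ===== VERDICT (by name: the statement is the Claim_ definition above) =====
theorem find_time_column_py_spec : Claim_equal_find_time_column_py := by
  intro columns _
  unfold Spec_find_time_column_py find_time_column_py find_time_column_py_alt
  rw [altGo_none]
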